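-- pv_equiv track=rewrite | github.com/kon-rad/augmi-skills | social-media-analyst/scripts/analyze_performance.py | compute_duration_analysis
-- ===== SOURCE A (Python) =====
-- def compute_duration_analysis(items):
--     """Analyze performance by content duration ranges."""
--     buckets = {
--         "0-15s": {"min": 0, "max": 16},
--         "16-30s": {"min": 16, "max": 31},
--         "31-60s": {"min": 31, "max": 61},
--         "1-3min": {"min": 61, "max": 181},
--         "3-10min": {"min": 181, "max": 601},
--         "10min+": {"min": 601, "max": float("inf")},
--     }
--
--     stats = {label: {"count": 0, "total_views": 0, "total_likes": 0} for label in buckets}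
--
--     for item in items:
--         dur = item.get("duration", 0) or 0
--         views = item.get("view_count", 0) or 0
--         likes = item.get("like_count", 0) or 0
--
--         for label, bounds in buckets.items():
--             if bounds["min"] <= dur < bounds["max"]:
--                 stats[label]["count"] += 1
--                 stats[label]["total_views"] += views
--                 stats[label]["total_likes"] += likes
--                 break
--
--     result = {}
--     for label, s in stats.items():
--         if s["count"] > 0:
--             result[label] = {
--                 "count": s["count"],
--                 "total_views": s["total_views"],
--                 "avg_views": int(s["total_views"] / s["count"]),
--                 "avg_likes": int(s["total_likes"] / s["count"]),
--             }
--
--     return result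
-- ===== SOURCE B (Python) =====
-- from bisect import bisect_right
--
-- _BOUNDARIES = [16, 31, 61, 181, 601]
-- _LABELS = ["0-15s", "16-30s", "31-60s", "1-3min", "3-10min", "10min+"]
--
--
-- def compute_duration_analysis(items):
--     """Analyze performance by content duration ranges."""
--     # parallel accumulators: [count, total_views, total_likes] per label
--     acc = [[0, 0, 0] for _ in _LABELS]
--
--     for item in items:
--         dur = item.get("duration", 0) or 0
--         if dur < 0:
--             continue  # below every bucket
--         views = item.get("view_count", 0) or 0
--         likes = item.get("like_count", 0) or 0
--         a = acc[bisect_right(_BOUNDARIES, dur)]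
--         a[0] += 1
--         a[1] += views
--         a[2] += likes
--
--     result = {}
--     for label, (count, views, likes) in zip(_LABELS, acc):
--         if count > 0:
--             result[label] = {
--                 "count": count,
--                 "total_views": views,
--                 "avg_views": int(views / count),
--                 "avg_likes": int(likes / count),
--             }
--     return result
-- ===== Notes on version B (the rewrite author's own statement) =====
-- stated objective: idiomatic
-- what changed: A's per-item linear scan over a dict of six min/max bucket ranges (with a nested stats dict-of-dicts) is replaced by a bisect_right lookup into a sorted boundary list that indexes parallel [count, views, likes] accumulators, zipped with the labels to build the result.
import Mathlib
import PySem

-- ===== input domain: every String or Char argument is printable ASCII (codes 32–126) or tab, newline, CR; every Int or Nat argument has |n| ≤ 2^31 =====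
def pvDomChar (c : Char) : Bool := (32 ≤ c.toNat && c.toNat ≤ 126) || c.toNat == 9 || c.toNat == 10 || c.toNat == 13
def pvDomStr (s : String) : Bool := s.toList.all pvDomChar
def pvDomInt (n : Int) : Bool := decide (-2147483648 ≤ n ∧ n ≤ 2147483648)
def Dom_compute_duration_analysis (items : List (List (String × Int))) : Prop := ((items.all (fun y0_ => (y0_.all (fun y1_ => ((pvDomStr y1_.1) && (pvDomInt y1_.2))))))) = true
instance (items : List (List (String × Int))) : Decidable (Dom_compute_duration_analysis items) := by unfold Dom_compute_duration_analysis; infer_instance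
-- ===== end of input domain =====

-- B replaces A's per-item linear scan over the six bucket ranges with a bisect_right index
-- into parallel accumulator arrays (idiomatic; same asymptotic cost).
-- Python's `int(total / count)` is ported as PySem.Int.truncdiv, exact while |total| < 2^53
-- (so throughout the stated |int| ≤ 2^31 domain for any realistic number of items).

-- ===== PORT A =====
-- item.get(key, 0): first-match association-list lookup with default 0.
-- The Python's `… or 0` is the identity on these int values (0 is falsy and maps to 0 itself).
def pvGetA (item : List (String × Int)) (key : String) : Int :=
  match item.find? (fun p => p.1 == key) with
  | some p => p.2
  | none => 0

-- the `buckets` dict: (label, (min, max)); float("inf") is ported as `none` in the max slot,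
-- exact here because `dur < inf` is true for every int duration.
def pvBucketsA : List (String × Int × Option Int) :=
  [("0-15s", (0, some 16)), ("16-30s", (16, some 31)), ("31-60s", (31, some 61)),
   ("1-3min", (61, some 181)), ("3-10min", (181, some 601)), ("10min+", (601, none))]

-- the `stats` dict comprehension
def pvStatsInitA : PySem.Dict String (PySem.Dict String Int) :=
  PySem.Dict.ofList (pvBucketsA.map (fun lb =>
    (lb.1, PySem.Dict.ofList [("count", 0), ("total_views", 0), ("total_likes", 0)])))

-- the inner `for label, bounds in buckets.items(): … break` loop
-- (stats[label][f] += x is Dict.modify; the label/field keys are always present, so the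
-- default is never consulted and this matches Python's KeyError-free `+=` exactly)
def pvScanA (dur views likes : Int) (stats : PySem.Dict String (PySem.Dict String Int)) :
    List (String × Int × Option Int) → PySem.Dict String (PySem.Dict String Int)
  | [] => stats
  | (label, bounds) :: rest =>
    if decide (bounds.1 ≤ dur) && bounds.2.all (fun m => decide (dur < m)) then
      stats.modify label PySem.Dict.empty (fun s =>
        ((s.modify "count" 0 (· + 1)).modify "total_views" 0 (· + views)).modify
          "total_likes" 0 (· + likes))
    else pvScanA dur views likes stats rest

-- the body of `for item in items`
def pvStepA (stats : PySem.Dict String (PySem.Dict String Int)) (item : List (String × Int)) :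
    PySem.Dict String (PySem.Dict String Int) :=
  let dur := pvGetA item "duration"
  let views := pvGetA item "view_count"
  let likes := pvGetA item "like_count"
  pvScanA dur views likes stats pvBucketsA

-- the `result` dict: labels are distinct, so each insertion appends a fresh key
def compute_duration_analysis (items : List (List (String × Int))) :
    List (String × List (String × Int)) :=
  let stats := items.foldl pvStepA pvStatsInitA
  stats.items.foldl (fun result ls =>
    let c := ls.2.getD "count" 0
    if c > 0 then
      result ++ [(ls.1,
        [("count", c), ("total_views", ls.2.getD "total_views" 0),
         ("avg_views", PySem.Int.truncdiv (ls.2.getD "total_views" 0) c),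
         ("avg_likes", PySem.Int.truncdiv (ls.2.getD "total_likes" 0) c)])]
    else result) []

-- ===== PORT B =====
def pvGetB (item : List (String × Int)) (key : String) : Int :=
  (((item.find? fun p => p.1 == key).map Prod.snd).getD 0)

def pvBoundariesB : List Int := [16, 31, 61, 181, 601]

def pvLabelsB : List String := ["0-15s", "16-30s", "31-60s", "1-3min", "3-10min", "10min+"]

-- body of Source B's accumulation loop; acc[idx] is always in range (bisect_right ≤ 5), the
-- getD default is never consulted
def pvStepB (acc : List (Int × Int × Int)) (item : List (String × Int)) :
    List (Int × Int × Int) :=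
  let dur := pvGetB item "duration"
  if dur < 0 then acc
  else
    let views := pvGetB item "view_count"
    let likes := pvGetB item "like_count"
    let i := PySem.List.bisectRight pvBoundariesB dur
    let a := acc.getD i (0, 0, 0)
    acc.set i (a.1 + 1, a.2.1 + views, a.2.2 + likes)

def compute_duration_analysis_alt (items : List (List (String × Int))) :
    List (String × List (String × Int)) :=
  let acc := items.foldl pvStepB (List.replicate 6 ((0, 0, 0) : Int × Int × Int))
  (pvLabelsB.zip acc).foldl (fun result p =>
    if p.2.1 > 0 then
      result ++ [(p.1,
        [("count", p.2.1), ("total_views", p.2.2.1),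
         ("avg_views", PySem.Int.truncdiv p.2.2.1 p.2.1),
         ("avg_likes", PySem.Int.truncdiv p.2.2.2 p.2.1)])]
    else result) []

-- ===== PRECONDITION & SPEC =====
def Spec_compute_duration_analysis (items : List (List (String × Int))) (out : List (String × List (String × Int))) : Prop := out = compute_duration_analysis_alt items
instance (items : List (List (String × Int))) (out : List (String × List (String × Int))) : Decidable (Spec_compute_duration_analysis items out) := by unfold Spec_compute_duration_analysis; infer_instance

-- ===== CLAIM (what is proved, stated in full; the proofs are below) =====
def Claim_equal_compute_duration_analysis : Prop := ∀ (items : List (List (String × Int))), Dom_compute_duration_analysis items → Spec_compute_duration_analysis items (compute_duration_analysis items)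

-- ===== LEMMAS AND PROOFS =====

-- A's per-bucket stats dict as a function of B's six accumulator triples
def pvTrip (t : Int × Int × Int) : PySem.Dict String Int :=
  PySem.Dict.mk [("count", t.1), ("total_views", t.2.1), ("total_likes", t.2.2)]

def pvReprS (a0 a1 a2 a3 a4 a5 : Int × Int × Int) : PySem.Dict String (PySem.Dict String Int) :=
  PySem.Dict.mk [("0-15s", pvTrip a0), ("16-30s", pvTrip a1), ("31-60s", pvTrip a2),
    ("1-3min", pvTrip a3), ("3-10min", pvTrip a4), ("10min+", pvTrip a5)]

lemma pvStatsInitA_eq : pvStatsInitA = pvReprS (0,0,0) (0,0,0) (0,0,0) (0,0,0) (0,0,0) (0,0,0) := by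
  decide

lemma pvBis0 (dur : Int) (h : 0 ≤ dur) (h' : dur < 16) :
    PySem.List.bisectRight pvBoundariesB dur = 0 := by
  simp [pvBoundariesB, PySem.List.bisectRight, PySem.List.bisectRightLoop]; split_ifs <;> omega

lemma pvBis1 (dur : Int) (h : 16 ≤ dur) (h' : dur < 31) :
    PySem.List.bisectRight pvBoundariesB dur = 1 := by
  simp [pvBoundariesB, PySem.List.bisectRight, PySem.List.bisectRightLoop]; split_ifs <;> omega

lemma pvBis2 (dur : Int) (h : 31 ≤ dur) (h' : dur < 61) :
    PySem.List.bisectRight pvBoundariesB dur = 2 := by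
  simp [pvBoundariesB, PySem.List.bisectRight, PySem.List.bisectRightLoop]; split_ifs <;> omega

lemma pvBis3 (dur : Int) (h : 61 ≤ dur) (h' : dur < 181) :
    PySem.List.bisectRight pvBoundariesB dur = 3 := by
  simp [pvBoundariesB, PySem.List.bisectRight, PySem.List.bisectRightLoop]; split_ifs <;> omega

lemma pvBis4 (dur : Int) (h : 181 ≤ dur) (h' : dur < 601) :
    PySem.List.bisectRight pvBoundariesB dur = 4 := by
  simp [pvBoundariesB, PySem.List.bisectRight, PySem.List.bisectRightLoop]; split_ifs <;> omega

lemma pvBis5 (dur : Int) (h : 601 ≤ dur) :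
    PySem.List.bisectRight pvBoundariesB dur = 5 := by
  simp [pvBoundariesB, PySem.List.bisectRight, PySem.List.bisectRightLoop]; split_ifs <;> omega

lemma pvStep_comm (item : List (String × Int)) (a0 a1 a2 a3 a4 a5 : Int × Int × Int) :
    ∃ b0 b1 b2 b3 b4 b5,
      pvStepB [a0, a1, a2, a3, a4, a5] item = [b0, b1, b2, b3, b4, b5] ∧
      pvStepA (pvReprS a0 a1 a2 a3 a4 a5) item = pvReprS b0 b1 b2 b3 b4 b5 := by
  have hg : pvGetB = pvGetA := by
    funext it key
    cases h : it.find? fun p => p.1 == key <;> simp [pvGetB, pvGetA, h]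
  unfold pvStepA pvStepB
  rw [hg]
  set dur := pvGetA item "duration" with hdur
  set views := pvGetA item "view_count" with hviews
  set likes := pvGetA item "like_count" with hlikes
  clear_value dur views likes
  by_cases h0 : dur < 0
  · exact ⟨a0, a1, a2, a3, a4, a5, by simp [h0],
      by simp [pvScanA, pvBucketsA, show ¬(0 ≤ dur) by omega, show ¬(16 ≤ dur) by omega,
        show ¬(31 ≤ dur) by omega, show ¬(61 ≤ dur) by omega, show ¬(181 ≤ dur) by omega,
        show ¬(601 ≤ dur) by omega]⟩
  by_cases h1 : dur < 16
  · exact ⟨(a0.1 + 1, a0.2.1 + views, a0.2.2 + likes), a1, a2, a3, a4, a5,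
      by simp [h0, pvBis0 dur (by omega) h1],
      by simp [pvScanA, pvBucketsA, pvReprS, pvTrip, PySem.Dict.modify, PySem.Dict.insert,
        PySem.Dict.get?, PySem.Dict.getD, PySem.Dict.empty, show 0 ≤ dur by omega, h1]⟩
  by_cases h2 : dur < 31
  · exact ⟨a0, (a1.1 + 1, a1.2.1 + views, a1.2.2 + likes), a2, a3, a4, a5,
      by simp [h0, pvBis1 dur (by omega) h2],
      by simp [pvScanA, pvBucketsA, pvReprS, pvTrip, PySem.Dict.modify, PySem.Dict.insert,
        PySem.Dict.get?, PySem.Dict.getD, PySem.Dict.empty, h1, show 16 ≤ dur by omega, h2]⟩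
  by_cases h3 : dur < 61
  · exact ⟨a0, a1, (a2.1 + 1, a2.2.1 + views, a2.2.2 + likes), a3, a4, a5,
      by simp [h0, pvBis2 dur (by omega) h3],
      by simp [pvScanA, pvBucketsA, pvReprS, pvTrip, PySem.Dict.modify, PySem.Dict.insert,
        PySem.Dict.get?, PySem.Dict.getD, PySem.Dict.empty, h1, h2, show 31 ≤ dur by omega, h3]⟩
  by_cases h4 : dur < 181
  · exact ⟨a0, a1, a2, (a3.1 + 1, a3.2.1 + views, a3.2.2 + likes), a4, a5,
      by simp [h0, pvBis3 dur (by omega) h4],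
      by simp [pvScanA, pvBucketsA, pvReprS, pvTrip, PySem.Dict.modify, PySem.Dict.insert,
        PySem.Dict.get?, PySem.Dict.getD, PySem.Dict.empty, h1, h2, h3, show 61 ≤ dur by omega, h4]⟩
  by_cases h5 : dur < 601
  · exact ⟨a0, a1, a2, a3, (a4.1 + 1, a4.2.1 + views, a4.2.2 + likes), a5,
      by simp [h0, pvBis4 dur (by omega) h5],
      by simp [pvScanA, pvBucketsA, pvReprS, pvTrip, PySem.Dict.modify, PySem.Dict.insert,
        PySem.Dict.get?, PySem.Dict.getD, PySem.Dict.empty, h1, h2, h3, h4, show 181 ≤ dur by omega, h5]⟩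
  · exact ⟨a0, a1, a2, a3, a4, (a5.1 + 1, a5.2.1 + views, a5.2.2 + likes),
      by simp [h0, pvBis5 dur (by omega)],
      by simp [pvScanA, pvBucketsA, pvReprS, pvTrip, PySem.Dict.modify, PySem.Dict.insert,
        PySem.Dict.get?, PySem.Dict.getD, PySem.Dict.empty, h1, h2, h3, h4, h5,
        show 601 ≤ dur by omega]⟩

lemma pvFold_comm (items : List (List (String × Int))) (a0 a1 a2 a3 a4 a5 : Int × Int × Int) :
    ∃ b0 b1 b2 b3 b4 b5,
      items.foldl pvStepB [a0, a1, a2, a3, a4, a5] = [b0, b1, b2, b3, b4, b5] ∧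
      items.foldl pvStepA (pvReprS a0 a1 a2 a3 a4 a5) = pvReprS b0 b1 b2 b3 b4 b5 := by
  induction items generalizing a0 a1 a2 a3 a4 a5 with
  | nil => exact ⟨a0, a1, a2, a3, a4, a5, rfl, rfl⟩
  | cons item rest ih =>
    obtain ⟨b0, b1, b2, b3, b4, b5, hB, hA⟩ := pvStep_comm item a0 a1 a2 a3 a4 a5
    obtain ⟨c0, c1, c2, c3, c4, c5, hB', hA'⟩ := ih b0 b1 b2 b3 b4 b5
    exact ⟨c0, c1, c2, c3, c4, c5, by simp [List.foldl, hB, hB'], by simp [List.foldl, hA, hA']⟩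

-- ===== VERDICT (by name: the statement is the Claim_ definition above) =====
lemma pvFinal_comm (b0 b1 b2 b3 b4 b5 : Int × Int × Int) :
    (pvReprS b0 b1 b2 b3 b4 b5).items.foldl (fun result ls =>
      let c := ls.2.getD "count" 0
      if c > 0 then
        result ++ [(ls.1,
          [("count", c), ("total_views", ls.2.getD "total_views" 0),
           ("avg_views", PySem.Int.truncdiv (ls.2.getD "total_views" 0) c),
           ("avg_likes", PySem.Int.truncdiv (ls.2.getD "total_likes" 0) c)])]
      else result) []
    = (pvLabelsB.zip [b0, b1, b2, b3, b4, b5]).foldl (fun result p =>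
      if p.2.1 > 0 then
        result ++ [(p.1,
          [("count", p.2.1), ("total_views", p.2.2.1),
           ("avg_views", PySem.Int.truncdiv p.2.2.1 p.2.1),
           ("avg_likes", PySem.Int.truncdiv p.2.2.2 p.2.1)])]
      else result) [] := by
  simp [pvReprS, pvTrip, pvLabelsB, PySem.Dict.getD, PySem.Dict.get?,
    List.foldl]

theorem compute_duration_analysis_spec : Claim_equal_compute_duration_analysis := by
  intro items _
  unfold Spec_compute_duration_analysis compute_duration_analysis compute_duration_analysis_alt
  obtain ⟨b0, b1, b2, b3, b4, b5, hB, hA⟩ :=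
    pvFold_comm items (0,0,0) (0,0,0) (0,0,0) (0,0,0) (0,0,0) (0,0,0)
  rw [pvStatsInitA_eq, hA, show List.replicate 6 ((0,0,0) : Int × Int × Int)
      = [(0,0,0), (0,0,0), (0,0,0), (0,0,0), (0,0,0), (0,0,0)] from rfl, hB]
  exact pvFinal_comm b0 b1 b2 b3 b4 b5
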